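-- pv_equiv track=rewrite | github.com/polio-nanopore/piranha | piranha/analysis/consensus_functions.py | merge_indels
-- ===== SOURCE A (Python) =====
-- from itertools import groupby, count
--
-- def merge_indels(indel_list,prefix):
--     if indel_list:
--         groups = groupby(indel_list, key=lambda item, c=count():item-next(c))
--         tmp = [list(g) for k, g in groups]
--         merged_indels = []
--         for i in tmp:
--             indel = f"{i[0]}:{prefix}{len(i)}"
--             merged_indels.append(indel)
--         return merged_indels
--
--     return indel_list
-- ===== SOURCE B (Python) =====
-- def merge_indels(indel_list, prefix):
--     if not indel_list:
--         return indel_list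
--     merged_indels = []
--     start = indel_list[0]
--     length = 1
--     for x in indel_list[1:]:
--         if x == start + length:
--             length += 1
--         else:
--             merged_indels.append(f"{start}:{prefix}{length}")
--             start, length = x, 1
--     merged_indels.append(f"{start}:{prefix}{length}")
--     return merged_indels
-- ===== Notes on version B (the rewrite author's own statement) =====
-- stated objective: idiomatic
-- what changed: Replaces the groupby/count trick that first materializes every run as a list and then formats each in a second pass with a single streaming loop that only maintains (start, length) of the current run and emits each descriptor as the run closes.
import Mathlib
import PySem

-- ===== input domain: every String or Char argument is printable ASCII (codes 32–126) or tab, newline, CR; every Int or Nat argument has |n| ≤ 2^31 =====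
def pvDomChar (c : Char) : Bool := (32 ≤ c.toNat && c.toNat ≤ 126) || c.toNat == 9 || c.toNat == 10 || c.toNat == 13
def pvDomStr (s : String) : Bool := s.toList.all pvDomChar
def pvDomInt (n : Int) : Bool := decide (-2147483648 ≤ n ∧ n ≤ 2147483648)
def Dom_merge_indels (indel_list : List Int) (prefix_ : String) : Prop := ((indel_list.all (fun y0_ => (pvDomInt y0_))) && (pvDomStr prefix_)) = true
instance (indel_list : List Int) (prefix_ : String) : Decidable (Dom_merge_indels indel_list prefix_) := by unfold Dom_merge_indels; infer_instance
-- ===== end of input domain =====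

-- B replaces A's groupby/count two-stage grouping with one streaming loop keeping (start, length); same values, idiomatic.

-- ===== PORT A =====
-- f"{i[0]}:{prefix}{len(i)}" for a group i (groups produced by groupby are never empty; "" for [] is unreachable)
def fmtGroupA (prefix_ : String) (g : List Int) : String :=
  match g with
  | [] => ""
  | x :: _ => PySem.Int.toStr x ++ ":" ++ prefix_ ++ PySem.Int.toStr (g.length : Int)

-- hand port of itertools.groupby with key = item - next(count()): i is the counter value for the
-- head element; adjacent items share a group iff their (item - index) keys are equal
def gbA (xs : List Int) (i : Int) : List (List Int) :=
  match xs with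
  | [] => []
  | x :: rest =>
    match gbA rest (i + 1) with
    | [] => [[x]]
    | [] :: gs => [x] :: gs
    | (y :: g) :: gs =>
      if x - i = y - (i + 1) then (x :: y :: g) :: gs else [x] :: (y :: g) :: gs

def merge_indels (indel_list : List Int) (prefix_ : String) : List String :=
  match indel_list with
  | [] => []   -- Python returns the (empty) input list
  | _ :: _ => (gbA indel_list 0).map (fmtGroupA prefix_)

-- ===== PORT B =====
def fmtB (prefix_ : String) (start len : Int) : String :=
  PySem.Int.toStr start ++ ":" ++ prefix_ ++ PySem.Int.toStr len

def loopB (prefix_ : String) (xs : List Int) (start len : Int) (acc : List String) : List String :=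
  match xs with
  | [] => acc ++ [fmtB prefix_ start len]
  | x :: rest =>
    if x = start + len then loopB prefix_ rest start (len + 1) acc
    else loopB prefix_ rest x 1 (acc ++ [fmtB prefix_ start len])

def merge_indels_alt (indel_list : List Int) (prefix_ : String) : List String :=
  match indel_list with
  | [] => []
  | x :: rest => loopB prefix_ rest x 1 []

-- ===== PRECONDITION & SPEC =====
def Spec_merge_indels (indel_list : List Int) (prefix_ : String) (out : List String) : Prop := out = merge_indels_alt indel_list prefix_
instance (indel_list : List Int) (prefix_ : String) (out : List String) : Decidable (Spec_merge_indels indel_list prefix_ out) := by unfold Spec_merge_indels; infer_instance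

-- ===== CLAIM (what is proved, stated in full; the proofs are below) =====
def Claim_equal_merge_indels : Prop := ∀ (indel_list : List Int) (prefix_ : String), Dom_merge_indels indel_list prefix_ → Spec_merge_indels indel_list prefix_ (merge_indels indel_list prefix_)

-- ===== LEMMAS AND PROOFS =====

-- "merge a pending run (start s, length len) into the groups of the remaining list"
def fuse (prefix_ : String) (s len : Int) (groups : List (List Int)) : List String :=
  match groups with
  | [] => [fmtB prefix_ s len]
  | g :: gs =>
    match g with
    | [] => [fmtB prefix_ s len]   -- unreachable: gbA groups are nonempty
    | y :: g' =>
      if y = s + len then fmtB prefix_ s (len + 1 + (g'.length : Int)) :: gs.map (fmtGroupA prefix_)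
      else fmtB prefix_ s len :: (g :: gs).map (fmtGroupA prefix_)

theorem fmtGroupA_cons (prefix_ : String) (y : Int) (g : List Int) :
    fmtGroupA prefix_ (y :: g) = fmtB prefix_ y (1 + (g.length : Int)) := by
  show PySem.Int.toStr y ++ ":" ++ prefix_ ++ PySem.Int.toStr ((g.length + 1 : Nat) : Int) = _
  rw [show ((g.length + 1 : Nat) : Int) = 1 + (g.length : Int) by omega]
  rfl
theorem gbA_ne_nil (xs : List Int) (i : Int) : ∀ g ∈ gbA xs i, g ≠ [] := by
  induction xs generalizing i with
  | nil => simp [gbA]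
  | cons x rest ih =>
    intro g hg
    rcases h : gbA rest (i + 1) with _ | ⟨g0, gs⟩
    · simp only [gbA, h] at hg; simp at hg; simp [hg]
    · rcases g0 with _ | ⟨y, g'⟩
      · simp only [gbA, h] at hg
        rw [List.mem_cons] at hg
        rcases hg with hg | hg
        · simp [hg]
        · exact ih (i + 1) g (by rw [h]; exact List.mem_cons_of_mem _ hg)
      · simp only [gbA, h] at hg
        split_ifs at hg with hc
        · rw [List.mem_cons] at hg
          rcases hg with hg | hg
          · simp [hg]
          · exact ih (i + 1) g (by rw [h]; exact List.mem_cons_of_mem _ hg)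
        · rw [List.mem_cons, List.mem_cons] at hg
          rcases hg with hg | hg | hg
          · simp [hg]
          · simp [hg]
          · exact ih (i + 1) g (by rw [h]; exact List.mem_cons_of_mem _ hg)

theorem loopB_eq_fuse (prefix_ : String) (xs : List Int) (i s len : Int) (acc : List String) :
    loopB prefix_ xs s len acc = acc ++ fuse prefix_ s len (gbA xs i) := by
  induction xs generalizing i s len acc with
  | nil => simp [loopB, gbA, fuse]
  | cons y rest ih =>
    rcases h : gbA rest (i + 1) with _ | ⟨g0, gs⟩
    · by_cases hc : y = s + len
      · simp only [loopB, gbA, h, if_pos hc, ih (i + 1) _ _ _, fuse]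
        subst hc; simp [fuse]
      · simp only [loopB, gbA, h, if_neg hc, ih (i + 1) _ _ _, fuse]
        simp [fuse, fmtGroupA_cons, if_neg hc]
    · rcases g0 with _ | ⟨z, g'⟩
      · exact absurd rfl (gbA_ne_nil rest (i + 1) [] (by rw [h]; exact List.mem_cons_self ..))
      · by_cases hc : y = s + len
        · by_cases hzc : z = y + 1
          · simp only [loopB, gbA, h, if_pos hc, if_pos (by omega : y - i = z - (i + 1)),
              ih (i + 1) _ _ _, fuse, if_pos (by omega : z = s + (len + 1)), if_pos hc,
              List.append_right_inj, List.cons.injEq]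
            exact ⟨congrArg (fmtB prefix_ s) (by simp [List.length_cons]; omega), trivial⟩
          · simp only [loopB, gbA, h, if_pos hc, if_neg (fun hh : y - i = z - (i + 1) => hzc (by omega)),
              ih (i + 1) _ _ _, fuse, if_neg (fun hh : z = s + (len + 1) => hzc (by omega))]
            simp [fmtGroupA_cons]
        · by_cases hzc : z = y + 1
          · simp only [loopB, gbA, h, if_neg hc, if_pos (by omega : y - i = z - (i + 1)),
              ih (i + 1) _ _ _, fuse, if_pos (by omega : z = y + 1), if_neg hc,
              List.append_assoc, List.singleton_append, List.append_right_inj, List.cons.injEq]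
            refine ⟨trivial, ?_⟩
            simp [fmtGroupA_cons]
            exact congrArg (fmtB prefix_ y) (by push_cast; ring)
          · simp only [loopB, gbA, h, if_neg hc, if_neg (fun hh : y - i = z - (i + 1) => hzc (by omega)),
              ih (i + 1) _ _ _, fuse, if_neg (fun hh : z = y + 1 => hzc hh), if_neg hc]
            simp [fmtGroupA_cons]

theorem mapA_eq_fuse (prefix_ : String) (xs : List Int) (i x : Int) :
    (gbA (x :: xs) i).map (fmtGroupA prefix_) = fuse prefix_ x 1 (gbA xs (i + 1)) := by
  rcases h : gbA xs (i + 1) with _ | ⟨g0, gs⟩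
  · simp only [gbA, h]
    simp [fuse, fmtGroupA_cons]
  · rcases g0 with _ | ⟨z, g'⟩
    · exact absurd rfl (gbA_ne_nil xs (i + 1) [] (by rw [h]; exact List.mem_cons_self ..))
    · by_cases hzc : z = x + 1
      · simp only [gbA, h, if_pos (by omega : x - i = z - (i + 1)), fuse,
          if_pos (by omega : z = x + 1), List.map, List.cons.injEq, fmtGroupA_cons]
        exact ⟨congrArg (fmtB prefix_ x) (by simp [List.length_cons]; omega), trivial⟩
      · simp only [gbA, h, if_neg (fun hh : x - i = z - (i + 1) => hzc (by omega)), fuse,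
          if_neg (fun hh : z = x + 1 => hzc hh)]
        simp [fmtGroupA_cons]

-- ===== VERDICT (by name: the statement is the Claim_ definition above) =====
theorem merge_indels_spec : Claim_equal_merge_indels := by
  intro indel_list prefix_ _
  unfold Spec_merge_indels
  rcases indel_list with _ | ⟨x, rest⟩
  · rfl
  · show (gbA (x :: rest) 0).map (fmtGroupA prefix_) = loopB prefix_ rest x 1 []
    rw [mapA_eq_fuse prefix_ rest 0 x, loopB_eq_fuse prefix_ rest (0 + 1) x 1 []]
    simp
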